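-- pv_equiv track=rewrite | github.com/koba925/alds | atcoder/KEYENCE2019/B.py | keyence
-- ===== SOURCE A (Python) =====
-- def keyence(S):
--     if S == "keyence":
--         return True
--
--     N = len(S)
--     for i in range(N - 1):
--         for j in range(i + 1, N):
--             if S[:i] + S[j:] == "keyence":
--                 return True
--     return False
-- ===== SOURCE B (Python) =====
-- def keyence(S):
--     t = "keyence"
--     if len(S) < 7:
--         return False
--     return any(S.startswith(t[:k]) and S.endswith(t[k:]) for k in range(8))
-- ===== Notes on version B (the rewrite author's own statement) =====
-- stated objective: faster
-- what changed: Replaced the O(N^3) double loop over all (i,j) cut points (each building and comparing a candidate string) by a single pass over the 8 prefix/suffix splits of 'keyence' checked with startswith/endswith.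
-- intended difference: On strings longer than 7 that start with 'keyence' and do not end in 'e', A returns False because its inner loop stops at j=N-1 and so never deletes a substring containing the last character, while B returns True; True is intended since deleting the suffix after 'keyence' yields 'keyence'. — e.g. on keyence("keyencez"): A returns false, B returns true
import Mathlib
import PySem

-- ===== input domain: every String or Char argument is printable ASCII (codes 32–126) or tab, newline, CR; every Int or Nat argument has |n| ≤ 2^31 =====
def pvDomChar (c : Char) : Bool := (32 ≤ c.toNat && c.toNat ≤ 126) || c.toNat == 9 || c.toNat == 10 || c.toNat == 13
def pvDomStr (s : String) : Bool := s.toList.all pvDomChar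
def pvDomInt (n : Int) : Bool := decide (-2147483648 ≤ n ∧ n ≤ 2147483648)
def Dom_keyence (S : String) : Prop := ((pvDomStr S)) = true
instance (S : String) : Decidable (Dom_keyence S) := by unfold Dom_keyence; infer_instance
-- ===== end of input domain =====

-- B replaces A's cubic two-cut search by a single pass over the 8 prefix/suffix splits of "keyence" (objective: faster).

-- ===== PORT A =====
def keyence (S : String) : Bool :=
  if S.toList == "keyence".toList then true
  else
    let N : Int := PySem.Str.len S
    (PySem.List.pyRange 0 (N - 1) 1).any fun i =>
      (PySem.List.pyRange (i + 1) N 1).any fun j =>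
        (PySem.List.slice S.toList none (some i) ++ PySem.List.slice S.toList (some j) none)
          == "keyence".toList

-- ===== PORT B =====
def keyence_alt (S : String) : Bool :=
  let t := "keyence".toList
  if PySem.Str.len S < 7 then false
  else
    (PySem.List.pyRange 0 8 1).any fun k =>
      PySem.Chars.startswith S.toList (PySem.List.slice t none (some k)) &&
      PySem.Chars.endswith S.toList (PySem.List.slice t (some k) none)

-- ===== PRECONDITION & SPEC =====
-- A's inner loop stops at j = N-1, so it can never delete a substring containing the last character:
-- on strings longer than 7 that start with "keyence" and do not end in 'e', A returns False while B
-- returns True; True is intended, since deleting the suffix after "keyence" yields "keyence".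
def D_keyence (S : String) : Prop :=
  7 < S.toList.length ∧
  PySem.Chars.startswith S.toList "keyence".toList = true ∧
  PySem.Chars.endswith S.toList ['e'] = false
instance (S : String) : Decidable (D_keyence S) := by unfold D_keyence; infer_instance

def Spec_keyence (S : String) (out : Bool) : Prop := ¬ D_keyence S → out = keyence_alt S
instance (S : String) (out : Bool) : Decidable (Spec_keyence S out) := by unfold Spec_keyence; infer_instance

def pvDiffWitness_keyence : String := "keyencez"
def pvDiffWitnessOut_keyence : Bool × Bool := (false, true)

-- ===== CLAIM (what is proved, stated in full; the proofs are below) =====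
def Claim_unchanged_keyence : Prop := ∀ (S : String), Dom_keyence S → Spec_keyence S (keyence S)
def Claim_changed_keyence : Prop := Dom_keyence (pvDiffWitness_keyence) ∧ D_keyence (pvDiffWitness_keyence) ∧ keyence (pvDiffWitness_keyence) = pvDiffWitnessOut_keyence.1 ∧ keyence_alt (pvDiffWitness_keyence) = pvDiffWitnessOut_keyence.2 ∧ pvDiffWitnessOut_keyence.1 ≠ pvDiffWitnessOut_keyence.2
def Claim_exact_keyence : Prop := ∀ (S : String), Dom_keyence S → D_keyence S → keyence S ≠ keyence_alt S

-- ===== LEMMAS AND PROOFS =====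

-- "the split of 'keyence' at k matches L": its first k chars are a prefix of L, the other 7-k a suffix
def kM (L : List Char) (k : Nat) : Prop :=
  L.take k = ("keyence".toList).take k ∧
  L.drop (L.length - (7 - k)) = ("keyence".toList).drop k

-- a two-cut result equals "keyence" iff the cuts sit at a matching split k = a
theorem cut_eq_iff (L : List Char) (a b : Nat) (hab : a < b) (hb : b < L.length) :
    (L.take a ++ L.drop b = "keyence".toList) ↔
    (b = L.length - 7 + a ∧ a ≤ 6 ∧ 8 ≤ L.length ∧ kM L a) := by
  have ht : ("keyence".toList).length = 7 := by decide
  constructor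
  · intro h
    have hlen := congrArg List.length h
    simp [List.length_append, List.length_take, List.length_drop] at hlen
    have hmin : min a L.length = a := by omega
    rw [hmin] at hlen
    have htk : L.take a = ("keyence".toList).take a := by
      have := congrArg (List.take a) h
      rwa [List.take_append_of_le_length (by simp [List.length_take]; omega),
        List.take_take, min_self] at this
    have hdr : L.drop b = ("keyence".toList).drop a := by
      have := congrArg (List.drop a) h
      rw [List.drop_append_of_le_length (by simp [List.length_take]; omega)] at this
      simpa [List.drop_take] using this
    refine ⟨by omega, by omega, by omega, htk, ?_⟩
    have : L.length - (7 - a) = b := by omega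
    rw [this, hdr]
  · rintro ⟨hbv, ha6, hN, htk, hdr⟩
    have : L.length - (7 - a) = b := by omega
    rw [this] at hdr
    rw [htk, hdr, List.take_append_drop]

theorem keyence_iff (S : String) :
    keyence S = true ↔
      (S.toList = "keyence".toList ∨
       (8 ≤ S.toList.length ∧ ∃ k : Nat, k ≤ 6 ∧ kM S.toList k)) := by
  unfold keyence
  by_cases heq : S.toList = "keyence".toList
  · simp [heq]
  · simp only [beq_iff_eq, heq, if_false, List.any_eq_true, PySem.List.mem_pyRange_one]
    simp only [PySem.Str.len_eq]
    constructor
    · rintro ⟨i, ⟨hi0, hi1⟩, j, ⟨hj0, hj1⟩, hcut⟩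
      rw [PySem.List.slice_to S.toList hi0, PySem.List.slice_from S.toList (by omega)] at hcut
      have hab : i.toNat < j.toNat := by omega
      have hb : j.toNat < S.toList.length := by omega
      obtain ⟨hbv, ha6, hN, hm⟩ := (cut_eq_iff _ _ _ hab hb).mp hcut
      exact Or.inr ⟨hN, i.toNat, ha6, hm⟩
    · rintro (h | ⟨hN, k, hk6, hm⟩)
      · exact h.elim
      · refine ⟨(k : Int), ⟨by omega, by omega⟩, ((S.toList.length - 7 + k : Nat) : Int), ⟨by omega, by omega⟩, ?_⟩
        rw [PySem.List.slice_to_natCast, PySem.List.slice_from_natCast]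
        exact (cut_eq_iff _ k _ (by omega) (by omega)).mpr ⟨rfl, hk6, hN, hm⟩

theorem keyence_alt_iff (S : String) :
    keyence_alt S = true ↔
      (7 ≤ S.toList.length ∧ ∃ k : Nat, k ≤ 7 ∧ kM S.toList k) := by
  have ht : ("keyence".toList).length = 7 := by decide
  unfold keyence_alt
  simp only [PySem.Str.len_eq]
  by_cases h7 : (S.toList.length : Int) < 7
  · simp only [h7, if_true]
    constructor
    · intro h; exact absurd h (by simp)
    · rintro ⟨hN, _⟩; omega
  · rw [if_neg h7]
    simp only [List.any_eq_true, PySem.List.mem_pyRange_one, Bool.and_eq_true,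
      PySem.Chars.startswith_iff, PySem.Chars.endswith_iff]
    constructor
    · rintro ⟨k, ⟨hk0, hk8⟩, hpre, hsuf⟩
      refine ⟨by omega, k.toNat, by omega, ?_, ?_⟩
      · rw [PySem.List.slice_to _ (by omega : (0:Int) ≤ k)] at hpre
        have := List.prefix_iff_eq_take.mp hpre
        rw [List.length_take, ht] at this
        have hmin : min k.toNat 7 = k.toNat := by omega
        rw [hmin] at this
        exact this.symm
      · rw [PySem.List.slice_from _ (by omega : (0:Int) ≤ k)] at hsuf
        have := List.suffix_iff_eq_drop.mp hsuf
        rw [List.length_drop, ht] at this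
        exact this.symm
    · rintro ⟨hN, k, hk7, htk, hdr⟩
      refine ⟨(k : Int), ⟨by omega, by omega⟩, ?_, ?_⟩
      · rw [PySem.List.slice_to_natCast]
        apply List.prefix_iff_eq_take.mpr
        rw [List.length_take, ht]
        have hmin : min k 7 = k := by omega
        rw [hmin]
        exact htk.symm
      · rw [PySem.List.slice_from_natCast]
        apply List.suffix_iff_eq_drop.mpr
        rw [List.length_drop, ht]
        exact hdr.symm

theorem kM_len7 (L : List Char) (k : Nat) (hk : k ≤ 7) (h7 : L.length = 7) (hm : kM L k) :
    L = "keyence".toList := by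
  obtain ⟨htk, hdr⟩ := hm
  have h : L.length - (7 - k) = k := by omega
  rw [h] at hdr
  rw [← List.take_append_drop k L, htk, hdr, List.take_append_drop]

theorem kM_seven_iff (L : List Char) : kM L 7 ↔ L.take 7 = "keyence".toList := by
  unfold kM
  rw [Nat.sub_self, Nat.sub_zero, List.drop_length]
  constructor
  · rintro ⟨h, _⟩; rw [h]; decide
  · intro h; exact ⟨by rw [h]; decide, by decide⟩

theorem kM_six (L : List Char) (h7 : L.take 7 = "keyence".toList)
    (he : ['e'] <:+ L) : kM L 6 := by
  constructor
  · have : L.take 6 = (L.take 7).take 6 := by simp [List.take_take]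
    rw [this, h7]
  · have := List.suffix_iff_eq_drop.mp he
    simp at this
    rw [← this]; decide

theorem kM_e (L : List Char) (k : Nat) (hk : k ≤ 6) (hm : kM L k) : ['e'] <:+ L := by
  have h1 : ['e'] <:+ ("keyence".toList).drop k := by
    interval_cases k <;> decide
  rw [← hm.2] at h1
  exact h1.trans (List.drop_suffix _ _)

theorem keyence_unchanged (S : String) (hnD : ¬ D_keyence S) : keyence S = keyence_alt S := by
  rw [Bool.eq_iff_iff, keyence_iff, keyence_alt_iff]
  constructor
  · rintro (h | ⟨hN, k, hk, hm⟩)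
    · have hlen : S.toList.length = 7 := by rw [h]; decide
      refine ⟨by omega, 0, by omega, by simp, ?_⟩
      have : S.toList.length - (7 - 0) = 0 := by omega
      rw [this, List.drop_zero, List.drop_zero, h]
    · exact ⟨by omega, k, by omega, hm⟩
  · rintro ⟨hN, k, hk7, hm⟩
    by_cases hN7 : S.toList.length = 7
    · exact Or.inl (kM_len7 _ k hk7 hN7 hm)
    · right
      by_cases hk6 : k ≤ 6
      · exact ⟨by omega, k, hk6, hm⟩
      · have hk : k = 7 := by omega
        subst hk
        have h7 : S.toList.take 7 = "keyence".toList := (kM_seven_iff _).mp hm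
        have hpre : PySem.Chars.startswith S.toList "keyence".toList = true := by
          rw [PySem.Chars.startswith_iff, List.prefix_iff_eq_take,
            show ("keyence".toList).length = 7 from by decide]
          exact h7.symm
        unfold D_keyence at hnD
        push Not at hnD
        have hend := hnD (by omega) hpre
        rw [Bool.ne_false_iff] at hend
        rw [PySem.Chars.endswith_iff] at hend
        exact ⟨by omega, 6, by omega, kM_six _ h7 hend⟩

theorem keyence_ne_of_D (S : String) (hD : D_keyence S) : keyence S ≠ keyence_alt S := by
  obtain ⟨hN, hpre, hend⟩ := hD
  have h7 : S.toList.take 7 = "keyence".toList := by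
    rw [PySem.Chars.startswith_iff, List.prefix_iff_eq_take,
      show ("keyence".toList).length = 7 from by decide] at hpre
    exact hpre.symm
  have hBt : keyence_alt S = true :=
    (keyence_alt_iff S).mpr ⟨by omega, 7, le_refl 7, (kM_seven_iff _).mpr h7⟩
  have hAf : keyence S = false := by
    rw [Bool.eq_false_iff]
    intro hA
    rcases (keyence_iff S).mp hA with h | ⟨_, k, hk6, hm⟩
    · have : S.toList.length = 7 := by rw [h]; decide
      omega
    · have := kM_e _ k hk6 hm
      rw [← PySem.Chars.endswith_iff] at this
      rw [this] at hend
      exact Bool.true_eq_false.mp hend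
  rw [hAf, hBt]
  simp

-- ===== VERDICT (by name: the statement is the Claim_ definition above) =====
theorem keyence_spec : Claim_unchanged_keyence := by
  intro S _ hnD
  exact keyence_unchanged S hnD
theorem keyence_changed : Claim_changed_keyence := by
  unfold Claim_changed_keyence; decide
theorem keyence_tight : Claim_exact_keyence := by
  intro S _ hD
  exact keyence_ne_of_D S hD
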